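-- pv_equiv track=rewrite | github.com/takahh/vqatom | make_train_data_etc.py | choose_best_chain_across_pdbids_cached
-- ===== SOURCE A (Python) =====
-- from typing import Optional, Dict, Tuple, List
--
-- def choose_best_chain_across_pdbids_cached(
--     pdbids: List[str],
--     pdb_cache_map: Dict[str, Tuple[str, str, str, int, int]],
-- ):
--     """
--     Priority:
--       1) ok_single_chain  -> accept directly
--       2) ok               -> choose highest-contact multi-chain candidate
--       3) otherwise fail
--     returns:
--       (best_pdbid, best_chain, best_seq, debug_status)
--     """
--     debug = []
--
--     # first: any single-chain success
--     for pdbid in pdbids: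
--         row = pdb_cache_map.get(pdbid)
--         if row is None:
--             debug.append(f"{pdbid}:missing_cache:0:0")
--             continue
--
--         chain_id, seq, status, top_contacts, second_contacts = row
--         debug.append(f"{pdbid}:{status}:{top_contacts}:{second_contacts}")
--
--         if status == "ok_single_chain":
--             return pdbid, chain_id, seq, "ok_single_chain"
--
--     # second: best multi-chain success
--     best_pdbid = None
--     best_chain = None
--     best_seq = None
--     best_contacts = -1
--     best_second = 0
--
--     for pdbid in pdbids:
--         row = pdb_cache_map.get(pdbid)
--         if row is None:
--             continue
--
--         chain_id, seq, status, top_contacts, second_contacts = row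
--         if status != "ok":
--             continue
--
--         if top_contacts > best_contacts:
--             best_pdbid = pdbid
--             best_chain = chain_id
--             best_seq = seq
--             best_contacts = top_contacts
--             best_second = second_contacts
--
--     if best_pdbid is not None:
--         return best_pdbid, best_chain, best_seq, f"ok:{best_contacts}:{best_second}"
--
--     return None, None, None, "all_failed|" + "|".join(debug)
-- ===== SOURCE B (Python) =====
-- def choose_best_chain_across_pdbids_cached(pdbids, pdb_cache_map):
--     # Single fused pass: maintains the debug log and the running best
--     # multi-chain candidate together; returns immediately on the first
--     # ok_single_chain row, exactly like the two-pass original.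
--     debug = []
--     best_pdbid = best_chain = best_seq = None
--     best_contacts = -1
--     best_second = 0
--
--     for pdbid in pdbids:
--         row = pdb_cache_map.get(pdbid)
--         if row is None:
--             debug.append(f"{pdbid}:missing_cache:0:0")
--             continue
--         chain_id, seq, status, top_contacts, second_contacts = row
--         debug.append(f"{pdbid}:{status}:{top_contacts}:{second_contacts}")
--         if status == "ok_single_chain":
--             return pdbid, chain_id, seq, "ok_single_chain"
--         if status == "ok" and top_contacts > best_contacts:
--             best_pdbid, best_chain, best_seq = pdbid, chain_id, seq
--             best_contacts, best_second = top_contacts, second_contacts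
--
--     if best_pdbid is not None:
--         return best_pdbid, best_chain, best_seq, f"ok:{best_contacts}:{best_second}"
--     return None, None, None, "all_failed|" + "|".join(debug)
-- ===== Notes on version B (the rewrite author's own statement) =====
-- stated objective: simpler
-- what changed: Replaces the two sequential scans (one for a single-chain hit building the debug log, one for the best multi-chain candidate) with a single fused pass that maintains the debug log and the running best candidate together, keeping the early return for the first ok_single_chain row.
import Mathlib
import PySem

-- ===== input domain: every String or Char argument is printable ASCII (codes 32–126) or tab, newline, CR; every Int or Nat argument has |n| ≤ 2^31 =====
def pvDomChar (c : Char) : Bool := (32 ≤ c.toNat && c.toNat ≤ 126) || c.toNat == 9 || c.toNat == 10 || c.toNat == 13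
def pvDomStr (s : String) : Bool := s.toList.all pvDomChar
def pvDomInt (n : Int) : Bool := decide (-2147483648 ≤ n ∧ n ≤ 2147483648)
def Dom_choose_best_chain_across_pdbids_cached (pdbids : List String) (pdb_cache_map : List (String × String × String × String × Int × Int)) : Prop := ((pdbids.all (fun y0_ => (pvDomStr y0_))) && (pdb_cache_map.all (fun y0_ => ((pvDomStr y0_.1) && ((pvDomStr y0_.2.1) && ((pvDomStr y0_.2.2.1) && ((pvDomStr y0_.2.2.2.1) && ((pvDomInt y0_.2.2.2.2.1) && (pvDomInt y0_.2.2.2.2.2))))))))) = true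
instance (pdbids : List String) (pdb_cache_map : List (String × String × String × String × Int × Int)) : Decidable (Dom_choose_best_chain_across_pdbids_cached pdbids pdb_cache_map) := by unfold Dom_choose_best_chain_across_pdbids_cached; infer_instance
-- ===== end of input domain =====

-- B fuses A's two sequential scans over pdbids into one pass that maintains the
-- debug log and the running best multi-chain candidate together (objective: simpler).

-- shared dict primitive: pdb_cache_map.get(pdbid) on the association list (first match)
def pvCacheGet (cache : List (String × String × String × String × Int × Int)) (p : String) : Option (String × String × String × Int × Int) :=
  (cache.find? (fun kv => kv.1 == p)).map (·.2)

-- f"{pdbid}:{status}:{top_contacts}:{second_contacts}"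
def pvLine (p st : String) (t sc : Int) : String :=
  p ++ ":" ++ st ++ ":" ++ PySem.Int.toStr t ++ ":" ++ PySem.Int.toStr sc

-- ===== PORT A =====
-- first loop of A: early return on ok_single_chain, otherwise the full debug list
def cbLoop1 (cache : List (String × String × String × String × Int × Int)) : List String → List String → Option (Option String × Option String × Option String × String) × List String
  | [], debug => (none, debug)
  | p :: rest, debug =>
    match pvCacheGet cache p with
    | none => cbLoop1 cache rest (debug ++ [p ++ ":missing_cache:0:0"])
    | some (chain_id, seq, status, top_contacts, second_contacts) =>
      let debug' := debug ++ [pvLine p status top_contacts second_contacts]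
      if status == "ok_single_chain" then
        (some (some p, some chain_id, some seq, "ok_single_chain"), debug')
      else cbLoop1 cache rest debug'

-- second loop of A: running best multi-chain candidate
def cbLoop2 (cache : List (String × String × String × String × Int × Int)) : List String → Option (String × String × String) → Int → Int → Option (String × String × String) × Int × Int
  | [], best, bc, bs => (best, bc, bs)
  | p :: rest, best, bc, bs =>
    match pvCacheGet cache p with
    | none => cbLoop2 cache rest best bc bs
    | some (chain_id, seq, status, top_contacts, second_contacts) =>
      if status == "ok" then
        if top_contacts > bc then cbLoop2 cache rest (some (p, chain_id, seq)) top_contacts second_contacts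
        else cbLoop2 cache rest best bc bs
      else cbLoop2 cache rest best bc bs

def choose_best_chain_across_pdbids_cached (pdbids : List String) (pdb_cache_map : List (String × String × String × String × Int × Int)) : Option String × Option String × Option String × String :=
  match cbLoop1 pdb_cache_map pdbids [] with
  | (some r, _) => r
  | (none, debug) =>
    match cbLoop2 pdb_cache_map pdbids none (-1) 0 with
    | (some (bp, bch, bsq), bc, bs) =>
      (some bp, some bch, some bsq, "ok:" ++ PySem.Int.toStr bc ++ ":" ++ PySem.Int.toStr bs)
    | (none, _, _) => (none, none, none, "all_failed|" ++ PySem.Str.join "|" debug)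

-- ===== PORT B =====
-- B's single fused loop: debug log and running best candidate in one pass
def cbFused (cache : List (String × String × String × String × Int × Int)) : List String → List String → Option (String × String × String) → Int → Int → Option String × Option String × Option String × String
  | [], debug, best, bc, bs =>
    match best with
    | some (bp, bch, bsq) => (some bp, some bch, some bsq, "ok:" ++ PySem.Int.toStr bc ++ ":" ++ PySem.Int.toStr bs)
    | none => (none, none, none, "all_failed|" ++ PySem.Str.join "|" debug)
  | p :: rest, debug, best, bc, bs =>
    match pvCacheGet cache p with
    | none => cbFused cache rest (debug ++ [p ++ ":missing_cache:0:0"]) best bc bs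
    | some (chain_id, seq, status, top_contacts, second_contacts) =>
      let debug' := debug ++ [pvLine p status top_contacts second_contacts]
      if status == "ok_single_chain" then (some p, some chain_id, some seq, "ok_single_chain")
      else if status == "ok" && top_contacts > bc then cbFused cache rest debug' (some (p, chain_id, seq)) top_contacts second_contacts
      else cbFused cache rest debug' best bc bs

def choose_best_chain_across_pdbids_cached_alt (pdbids : List String) (pdb_cache_map : List (String × String × String × String × Int × Int)) : Option String × Option String × Option String × String :=
  cbFused pdb_cache_map pdbids [] none (-1) 0

-- ===== PRECONDITION & SPEC =====
def Spec_choose_best_chain_across_pdbids_cached (pdbids : List String) (pdb_cache_map : List (String × String × String × String × Int × Int)) (out : Option String × Option String × Option String × String) : Prop := out = choose_best_chain_across_pdbids_cached_alt pdbids pdb_cache_map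
instance (pdbids : List String) (pdb_cache_map : List (String × String × String × String × Int × Int)) (out : Option String × Option String × Option String × String) : Decidable (Spec_choose_best_chain_across_pdbids_cached pdbids pdb_cache_map out) := by unfold Spec_choose_best_chain_across_pdbids_cached; infer_instance

-- ===== CLAIM (what is proved, stated in full; the proofs are below) =====
def Claim_equal_choose_best_chain_across_pdbids_cached : Prop := ∀ (pdbids : List String) (pdb_cache_map : List (String × String × String × String × Int × Int)), Dom_choose_best_chain_across_pdbids_cached pdbids pdb_cache_map → Spec_choose_best_chain_across_pdbids_cached pdbids pdb_cache_map (choose_best_chain_across_pdbids_cached pdbids pdb_cache_map)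

-- ===== LEMMAS AND PROOFS =====

-- the fused loop computes exactly what A's two loops compose to, for every accumulator state
theorem cbFused_eq (cache : List (String × String × String × String × Int × Int)) :
    ∀ (pdbids debug : List String) (best : Option (String × String × String)) (bc bs : Int),
      cbFused cache pdbids debug best bc bs =
        match cbLoop1 cache pdbids debug with
        | (some r, _) => r
        | (none, debug') =>
          match cbLoop2 cache pdbids best bc bs with
          | (some (bp, bch, bsq), b1, b2) =>
            (some bp, some bch, some bsq, "ok:" ++ PySem.Int.toStr b1 ++ ":" ++ PySem.Int.toStr b2)
          | (none, _, _) => (none, none, none, "all_failed|" ++ PySem.Str.join "|" debug')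
  | [], debug, best, bc, bs => by
    cases best with
    | none => simp [cbFused, cbLoop1, cbLoop2]
    | some b => rcases b with ⟨bp, bch, bsq⟩; simp [cbFused, cbLoop1, cbLoop2]
  | p :: rest, debug, best, bc, bs => by
    cases hrow : pvCacheGet cache p with
    | none =>
      simp only [cbFused, cbLoop1, cbLoop2, hrow]
      exact cbFused_eq cache rest (debug ++ [p ++ ":missing_cache:0:0"]) best bc bs
    | some row =>
      rcases row with ⟨c, s, st, t, sc⟩
      simp only [cbFused, cbLoop1, cbLoop2, hrow]
      by_cases hb1 : (st == "ok_single_chain") = true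
      · simp [hb1]
      · rw [if_neg hb1, if_neg hb1]
        by_cases hb2 : (st == "ok") = true
        · rw [if_pos hb2]
          by_cases hb3 : t > bc
          · rw [if_pos (by simp [hb2, hb3]), if_pos hb3]
            exact cbFused_eq cache rest (debug ++ [pvLine p st t sc]) (some (p, c, s)) t sc
          · rw [if_neg (by simp [hb3]), if_neg hb3]
            exact cbFused_eq cache rest (debug ++ [pvLine p st t sc]) best bc bs
        · rw [if_neg (by simp [hb2]), if_neg hb2]
          exact cbFused_eq cache rest (debug ++ [pvLine p st t sc]) best bc bs

-- ===== VERDICT (by name: the statement is the Claim_ definition above) =====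
theorem choose_best_chain_across_pdbids_cached_spec : Claim_equal_choose_best_chain_across_pdbids_cached := by
  intro pdbids cache _
  show _ = _
  rw [choose_best_chain_across_pdbids_cached_alt, cbFused_eq, choose_best_chain_across_pdbids_cached]
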